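-- pv_equiv track=rewrite | github.com/zarrock256/python | numbersGenerator.py | almostSortedReversed
-- ===== SOURCE A (Python) =====
-- def almostSortedReversed(n):        #(c)
--     tab = []
--     for i in range(n):
--         tab.append(i)
--     for i in range(0, n, 2):
--         if i < n-1:
--             temp = tab[i]
--             tab[i] = tab[i+1]
--             tab[i+1] = temp
--     tab.reverse()
--     return tab
-- ===== SOURCE B (Python) =====
-- def almostSortedReversed(n):
--     # Build the answer directly in its final order: the unpaired last element
--     # first (odd n), then each pair block [2k, 2k+1] from the top pair down.
--     # No intermediate array, no swapping, no reverse pass.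
--     out = [n - 1] if n > 0 and n % 2 else []
--     m = n - n % 2 if n > 0 else n
--     while m > 0:
--         out.append(m - 2)
--         out.append(m - 1)
--         m -= 2
--     return out
-- ===== Notes on version B (the rewrite author's own statement) =====
-- stated objective: alternative
-- what changed: Instead of A's three staged passes with mutation (build 0..n-1, swap adjacent pairs in place, reverse), B never materialises the sorted array: it emits the answer directly in final order, starting with the unpaired last element for odd n and then appending each pair block [m-2, m-1] while counting m down by 2 from the top.
import Mathlib
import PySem

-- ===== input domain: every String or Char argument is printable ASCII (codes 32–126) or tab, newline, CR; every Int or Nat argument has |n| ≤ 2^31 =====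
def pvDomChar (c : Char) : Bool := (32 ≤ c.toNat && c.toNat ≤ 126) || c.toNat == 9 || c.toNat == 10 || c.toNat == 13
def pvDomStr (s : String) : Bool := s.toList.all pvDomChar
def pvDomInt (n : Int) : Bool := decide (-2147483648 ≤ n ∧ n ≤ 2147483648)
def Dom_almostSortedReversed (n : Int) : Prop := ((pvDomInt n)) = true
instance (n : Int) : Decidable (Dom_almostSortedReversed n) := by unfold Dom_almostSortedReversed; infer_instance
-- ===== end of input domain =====

-- B emits the answer directly in its final order (odd leftover, then pair blocks from the top down),
-- replacing A's build array / swap pairs in place / reverse (objective: alternative single construction pass).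

-- ===== PORT A =====
-- loop body of 'for i in range(0, n, 2): if i < n-1: temp = tab[i]; tab[i] = tab[i+1]; tab[i+1] = temp'
-- (indices are in range whenever the guard holds, so the total pySetD/pyGetD forms are exact)
def pvSwapStep (n : Int) (t : List Int) (i : Int) : List Int :=
  if i < n - 1 then
    PySem.List.pySetD (PySem.List.pySetD t i (PySem.List.pyGetD t (i + 1) 0)) (i + 1) (PySem.List.pyGetD t i 0)
  else t

def almostSortedReversed (n : Int) : List Int :=
  let tab := (PySem.List.pyRange 0 n 1).foldl (fun t i => t ++ [i]) []
  let tab := (PySem.List.pyRange 0 n 2).foldl (pvSwapStep n) tab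
  tab.reverse

-- ===== PORT B =====
-- 'while m > 0: out.append(m - 2); out.append(m - 1); m -= 2'
-- (structural fuel recursion: m.toNat bounds the number of iterations, each decreases m by 2)
def pvPairsLoop (fuel : Nat) (m : Int) (out : List Int) : List Int :=
  match fuel with
  | 0 => out
  | f + 1 => if 0 < m then pvPairsLoop f (m - 2) (out ++ [m - 2, m - 1]) else out

def almostSortedReversed_alt (n : Int) : List Int :=
  let out := if 0 < n ∧ PySem.Int.mod n 2 = 1 then [n - 1] else []
  let m := if 0 < n then n - PySem.Int.mod n 2 else n
  pvPairsLoop m.toNat m out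

-- ===== PRECONDITION & SPEC =====
def Spec_almostSortedReversed (n : Int) (out : List Int) : Prop := out = almostSortedReversed_alt n
instance (n : Int) (out : List Int) : Decidable (Spec_almostSortedReversed n out) := by unfold Spec_almostSortedReversed; infer_instance

-- ===== CLAIM (what is proved, stated in full; the proofs are below) =====
def Claim_equal_almostSortedReversed : Prop := ∀ (n : Int), Dom_almostSortedReversed n → Spec_almostSortedReversed n (almostSortedReversed n)

-- ===== LEMMAS AND PROOFS =====

-- the closed-form value A's swap loop leaves at position k (m = length)
def pvG (m k : Nat) : Int :=
  if k % 2 = 0 then (if k + 1 < m then ((k + 1 : Nat) : Int) else (k : Int)) else ((k - 1 : Nat) : Int)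

lemma pvLoopInv (m : Nat) : ∀ (j : Nat), 2 * j ≤ m + 1 →
    (List.range j).foldl (fun (t : List Int) (k : Nat) => pvSwapStep (m : Int) t (2 * (k : Int)))
      ((List.range m).map (fun (k : Nat) => (k : Int)))
    = (List.range m).map (fun (k : Nat) => if k < 2 * j then pvG m k else (k : Int)) := by
  intro j
  induction j with
  | zero => intro _; simp
  | succ j ih =>
    intro hj
    rw [List.range_succ, List.foldl_append, ih (by omega)]
    simp only [List.foldl_cons, List.foldl_nil]
    set t : List Int := (List.range m).map (fun (k : Nat) => if k < 2 * j then pvG m k else (k : Int)) with ht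
    by_cases hg : 2 * j + 1 < m
    · have hcast : (2 * (j : Int)) = ((2 * j : Nat) : Int) := by push_cast; ring
      have hc1 : (2 * (j : Int)) + 1 = ((2 * j + 1 : Nat) : Int) := by push_cast; ring
      rw [pvSwapStep, if_pos (by omega), hc1, hcast,
          PySem.List.pyGetD_natCast, PySem.List.pyGetD_natCast,
          PySem.List.pySetD_natCast, PySem.List.pySetD_natCast, ht,
          PySem.List.getD_map_range _ _ _ _ (by omega),
          PySem.List.getD_map_range _ _ _ _ (by omega)]
      apply List.ext_getElem
      · simp
      · intro k hk1 hk2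
        simp only [List.length_set, List.length_map, List.length_range] at hk1
        simp only [List.getElem_set, List.getElem_map, List.getElem_range]
        unfold pvG
        split_ifs <;> simp_all <;> omega
    · rw [pvSwapStep, if_neg (by omega), ht]
      apply List.map_congr_left
      intro k hk
      rw [List.mem_range] at hk
      unfold pvG
      split_ifs <;> simp_all <;> omega

lemma pvA_eq (m : Nat) : almostSortedReversed (m : Int) = ((List.range m).map (pvG m)).reverse := by
  unfold almostSortedReversed
  simp only [PySem.List.foldl_append_singleton_eq_self, List.nil_append]
  have hq : PySem.List.pyRange 0 (m : Int) 2
      = (List.range ((m + 1) / 2)).map (fun (k : Nat) => (0 : Int) + 2 * (k : Int)) := by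
    rw [PySem.List.pyRange_of_pos 0 (m : Int) (by norm_num)]
    congr 2
    by_cases hm : 0 < m
    · rw [if_pos (by exact_mod_cast hm)]
      rw [show ((m : Int) - 0 + 2 - 1) = ((m + 1 : Nat) : Int) by push_cast; ring]
      rw [show (2 : Int) = ((2 : Nat) : Int) by norm_num, ← Int.natCast_ediv, Int.toNat_natCast]
    · rw [if_neg (by omega), show m = 0 by omega]
  rw [hq, List.foldl_map, PySem.List.pyRange_one]
  simp only [Int.sub_zero, Int.toNat_natCast, zero_add]
  rw [pvLoopInv m ((m + 1) / 2) (by omega)]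
  congr 1
  apply List.map_congr_left
  intro k hk
  rw [List.mem_range] at hk
  rw [if_pos (by omega)]

-- swapped-pair flattening of A's closed form, even length
lemma pvG_even (p : Nat) : (List.range (2 * p)).map (pvG (2 * p))
    = (List.range p).flatMap (fun k => [((2 * k + 1 : Nat) : Int), ((2 * k : Nat) : Int)]) := by
  induction p with
  | zero => simp
  | succ p ih =>
    have hr : 2 * (p + 1) = 2 * p + 1 + 1 := by ring
    rw [hr, List.range_succ, List.range_succ, List.map_append, List.map_append, List.range_succ,
        List.flatMap_append]
    have hmap : (List.range (2 * p)).map (pvG (2 * p + 1 + 1)) = (List.range (2 * p)).map (pvG (2 * p)) := by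
      apply List.map_congr_left
      intro k hk
      rw [List.mem_range] at hk
      unfold pvG
      split_ifs <;> simp_all <;> omega
    rw [hmap, ih]
    simp only [List.map_cons, List.map_nil, List.flatMap_cons, List.flatMap_nil, List.append_assoc]
    congr 1
    unfold pvG
    rw [if_pos (by omega), if_pos (by omega), if_neg (by omega)]
    simp

-- zeta-reduced form of B's definition
lemma pvAlt_unfold (n : Int) : almostSortedReversed_alt n
    = pvPairsLoop (if 0 < n then n - PySem.Int.mod n 2 else n).toNat
        (if 0 < n then n - PySem.Int.mod n 2 else n)
        (if 0 < n ∧ PySem.Int.mod n 2 = 1 then [n - 1] else []) := rfl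

-- B's while loop, on even nonnegative argument, with enough fuel
lemma pvPairsLoop_eq (p : Nat) : ∀ (fuel : Nat) (out : List Int), p ≤ fuel →
    pvPairsLoop fuel ((2 * p : Nat) : Int) out
    = out ++ (List.range p).reverse.flatMap (fun k => [((2 * k : Nat) : Int), ((2 * k + 1 : Nat) : Int)]) := by
  induction p with
  | zero =>
    intro fuel out _
    cases fuel with
    | zero => simp [pvPairsLoop]
    | succ f => simp [pvPairsLoop]
  | succ p ih =>
    intro fuel out hf
    cases fuel with
    | zero => omega
    | succ f =>
      rw [pvPairsLoop, if_pos (by push_cast; omega)]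
      have h2 : ((2 * (p + 1) : Nat) : Int) - 2 = ((2 * p : Nat) : Int) := by push_cast; ring
      have h1 : ((2 * (p + 1) : Nat) : Int) - 1 = ((2 * p + 1 : Nat) : Int) := by push_cast; ring
      rw [h2, h1, ih f _ (by omega), List.range_succ, List.reverse_append]
      simp [List.append_assoc]

lemma pvB_eq (m : Nat) : almostSortedReversed_alt (m : Int) = ((List.range m).map (pvG m)).reverse := by
  by_cases hm : 0 < m
  · have hmod : PySem.Int.mod (m : Int) 2 = ((m % 2 : Nat) : Int) := by
      exact_mod_cast PySem.Int.mod_natCast m 2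
    have hrev : ∀ p : Nat, ((List.range (2 * p)).map (pvG (2 * p))).reverse
        = (List.range p).reverse.flatMap (fun k => [((2 * k : Nat) : Int), ((2 * k + 1 : Nat) : Int)]) := by
      intro p
      rw [pvG_even, List.reverse_flatMap]
      congr 1
    rw [pvAlt_unfold]
    rcases Nat.even_or_odd m with ⟨p, hp⟩ | ⟨p, hp⟩
    · have hp2 : m = 2 * p := by omega
      subst hp2
      rw [hmod]
      have hpos : (0 : Int) < ((2 * p : Nat) : Int) := by exact_mod_cast hm
      rw [if_pos hpos, if_neg (by push_cast; omega)]
      have : ((2 * p : Nat) : Int) - ((2 * p % 2 : Nat) : Int) = ((2 * p : Nat) : Int) := by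
        push_cast; omega
      rw [this, Int.toNat_natCast, pvPairsLoop_eq p (2 * p) _ (by omega), hrev p, List.nil_append]
    · subst hp
      rw [hmod]
      have hpos : (0 : Int) < ((2 * p + 1 : Nat) : Int) := by exact_mod_cast hm
      rw [if_pos hpos, if_pos ⟨hpos, by push_cast; omega⟩]
      have : ((2 * p + 1 : Nat) : Int) - (((2 * p + 1) % 2 : Nat) : Int) = ((2 * p : Nat) : Int) := by
        push_cast; omega
      rw [this, Int.toNat_natCast, pvPairsLoop_eq p (2 * p) _ (by omega)]
      have hlast : (List.range (2 * p + 1)).map (pvG (2 * p + 1))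
          = (List.range (2 * p)).map (pvG (2 * p)) ++ [((2 * p : Nat) : Int)] := by
        rw [List.range_succ, List.map_append]
        congr 1
        · apply List.map_congr_left
          intro k hk
          rw [List.mem_range] at hk
          unfold pvG
          split_ifs <;> simp_all <;> omega
        · simp only [List.map_cons, List.map_nil]
          unfold pvG
          rw [if_pos (by omega), if_neg (by omega)]
      rw [hlast, List.reverse_append, hrev p]
      have h1 : ((2 * p + 1 : Nat) : Int) - 1 = ((2 * p : Nat) : Int) := by push_cast; ring
      rw [h1]
      simp
  · have hm0 : m = 0 := by omega
    subst hm0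
    rw [pvAlt_unfold, if_neg (by norm_num), if_neg (by norm_num)]
    norm_num [pvPairsLoop]

-- ===== VERDICT (by name: the statement is the Claim_ definition above) =====
theorem almostSortedReversed_spec : Claim_equal_almostSortedReversed := by
  intro n _
  unfold Spec_almostSortedReversed
  by_cases hn : 0 ≤ n
  · obtain ⟨m, rfl⟩ : ∃ m : Nat, n = (m : Int) := ⟨n.toNat, by omega⟩
    rw [pvA_eq m, pvB_eq m]
  · have h1 : PySem.List.pyRange 0 n 1 = [] := PySem.List.pyRange_one_eq_nil (by omega)
    have h2 : PySem.List.pyRange 0 n 2 = [] := by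
      rw [PySem.List.pyRange_of_pos 0 n (by norm_num), if_neg (by omega)]
      simp
    rw [show almostSortedReversed n = [] by simp [almostSortedReversed, h1, h2]]
    rw [pvAlt_unfold, if_neg (by omega), if_neg (by omega), show n.toNat = 0 by omega]
    simp [pvPairsLoop]
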